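-- pv_equiv track=rewrite | github.com/tomjacobson612/Tozny-Interview-Problems | main.py | string_contains_year
-- ===== SOURCE A (Python) =====
-- def string_contains_year(string, digits=4):
--     """Checks the inputted string to see whether it contains a year. A year is considered to be any sequence of exactly
--     four numbers with no spaces between. Can change number of sequential digits with 'digits' argument, default is 4."""
--
--     count = 0
--     length = len(string)
--
--     for x in range(length):
--         if string[x].isdigit():
--             count += 1
--         elif not string[x].isdigit():
--             count = 0
--             continue
--         if count == digits:
--             if x == (length-1):
--                 return True
--             elif not string[x+1].isdigit():
--                 return True
--             else:
--                 continue
--     return False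
-- ===== SOURCE B (Python) =====
-- def string_contains_year(string, digits=4):
--     """Group-then-measure: scan maximal digit runs with two indices; True iff some run has length exactly `digits`."""
--     i, n = 0, len(string)
--     while i < n:
--         if string[i].isdigit():
--             j = i
--             while j < n and string[j].isdigit():
--                 j += 1
--             if j - i == digits:
--                 return True
--             i = j
--         else:
--             i += 1
--     return False
-- ===== Notes on version B (the rewrite author's own statement) =====
-- stated objective: simpler
-- what changed: Replaces A's running counter with next-character lookahead by a two-pointer group-then-measure scan: find each maximal digit run with an inner index sweep and compare its length to digits.
import Mathlib
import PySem

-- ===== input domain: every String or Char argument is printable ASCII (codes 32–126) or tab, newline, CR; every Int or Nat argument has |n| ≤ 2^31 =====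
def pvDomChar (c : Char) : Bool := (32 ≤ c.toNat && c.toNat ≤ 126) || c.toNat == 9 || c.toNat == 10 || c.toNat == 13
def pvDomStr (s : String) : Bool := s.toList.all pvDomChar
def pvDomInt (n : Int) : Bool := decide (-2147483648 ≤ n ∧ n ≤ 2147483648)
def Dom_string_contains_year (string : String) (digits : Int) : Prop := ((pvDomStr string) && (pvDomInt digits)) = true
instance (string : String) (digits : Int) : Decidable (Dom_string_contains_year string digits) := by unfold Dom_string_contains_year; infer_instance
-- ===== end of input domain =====

-- B replaces A's running counter + next-character lookahead by a two-pointer scan over maximal digit runs (simpler decomposition, same cost).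


-- ===== PORT A =====
-- literal transliteration of A's indexed for-loop with the running `count`,
-- the `count == digits` check and the `string[x+1]` lookahead.
def goA (cs : List Char) (digits : Int) (x : Nat) (count : Int) : Bool :=
  if hx : x < cs.length then
    if PySem.Chars.isdigit cs[x] then
      if count + 1 = digits then
        if hlast : x = cs.length - 1 then true
        else if !PySem.Chars.isdigit (cs[x+1]'(by omega)) then true
        else goA cs digits (x+1) (count+1)
      else goA cs digits (x+1) (count+1)
    else goA cs digits (x+1) 0
  else false
termination_by cs.length - x

def string_contains_year (string : String) (digits : Int) : Bool :=
  goA string.toList digits 0 0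

-- ===== PORT B =====
-- literal transliteration of B's two-pointer scan: `runEnd` is the inner
-- `while j < n and string[j].isdigit(): j += 1`, `goB` the outer while loop.
def runEnd (cs : List Char) (j : Nat) : Nat :=
  if hj : j < cs.length then
    if PySem.Chars.isdigit cs[j] then runEnd cs (j+1) else j
  else j
termination_by cs.length - j

theorem le_runEnd (cs : List Char) (j : Nat) : j ≤ runEnd cs j := by
  unfold runEnd
  split
  · split
    · exact Nat.le_trans (Nat.le_succ j) (le_runEnd cs (j+1))
    · exact Nat.le_refl j
  · exact Nat.le_refl j
termination_by cs.length - j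

theorem runEnd_succ (cs : List Char) (j : Nat) (hj : j < cs.length)
    (hd : PySem.Chars.isdigit cs[j] = true) : runEnd cs j = runEnd cs (j+1) := by
  rw [runEnd, dif_pos hj, if_pos hd]

def goB (cs : List Char) (digits : Int) (i : Nat) : Bool :=
  if hi : i < cs.length then
    if hd : PySem.Chars.isdigit cs[i] then
      if ((runEnd cs i : Int) - (i : Int)) = digits then true
      else goB cs digits (runEnd cs i)
    else goB cs digits (i+1)
  else false
termination_by cs.length - i
decreasing_by
  · have h1 := runEnd_succ cs i hi hd
    have h2 := le_runEnd cs (i+1)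
    omega
  · omega

def string_contains_year_alt (string : String) (digits : Int) : Bool :=
  goB string.toList digits 0

-- ===== PRECONDITION & SPEC =====
def Spec_string_contains_year (string : String) (digits : Int) (out : Bool) : Prop := out = string_contains_year_alt string digits
instance (string : String) (digits : Int) (out : Bool) : Decidable (Spec_string_contains_year string digits out) := by unfold Spec_string_contains_year; infer_instance

-- ===== CLAIM (what is proved, stated in full; the proofs are below) =====
def Claim_equal_string_contains_year : Prop := ∀ (string : String) (digits : Int), Dom_string_contains_year string digits → Spec_string_contains_year string digits (string_contains_year string digits)

-- ===== LEMMAS AND PROOFS =====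

theorem runEnd_le (cs : List Char) (j : Nat) (h : j ≤ cs.length) : runEnd cs j ≤ cs.length := by
  unfold runEnd
  split
  · split
    · exact runEnd_le cs (j+1) (by omega)
    · exact h
  · exact h
termination_by cs.length - j

-- every position strictly inside [j, runEnd cs j) holds a digit
theorem runEnd_digits (cs : List Char) (j : Nat) :
    ∀ t, j ≤ t → t < runEnd cs j → (htl : t < cs.length) →
      PySem.Chars.isdigit cs[t] = true := by
  intro t h1 h2 htl
  rw [runEnd] at h2
  split at h2
  · rename_i hj
    split at h2
    · rename_i hd
      rcases Nat.eq_or_lt_of_le h1 with rfl | hlt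
      · exact hd
      · exact runEnd_digits cs (j+1) t hlt h2 htl
    · omega
  · omega
termination_by cs.length - j

-- the character at runEnd (when in range) is not a digit
theorem runEnd_not_digit (cs : List Char) (j k : Nat) (hk : runEnd cs j = k)
    (hlt : k < cs.length) : PySem.Chars.isdigit cs[k] = false := by
  rw [runEnd] at hk
  split at hk
  · rename_i hj
    split at hk
    · exact runEnd_not_digit cs (j+1) k hk hlt
    · rename_i hd
      subst hk
      simpa using hd
  · omega
termination_by cs.length - j

-- at a run boundary (end of string or a non-digit position) A's count is irrelevant
theorem goA_reset (cs : List Char) (d : Int) (j : Nat) (hj : j ≤ cs.length)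
    (hstop : j = cs.length ∨ ((h : j < cs.length) → PySem.Chars.isdigit cs[j] = false)) :
    ∀ c : Int, goA cs d j c = goA cs d j 0 := by
  intro c
  by_cases hlt : j < cs.length
  · have hnd : PySem.Chars.isdigit (cs[j]'hlt) = false := by
      rcases hstop with rfl | h
      · omega
      · exact h hlt
    conv_lhs => rw [goA]
    conv_rhs => rw [goA]
    rw [dif_pos hlt, dif_pos hlt, if_neg (by simp [hnd]), if_neg (by simp [hnd])]
  · conv_lhs => rw [goA]
    conv_rhs => rw [goA]
    rw [dif_neg hlt, dif_neg hlt]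

-- A inside the digit run [y, j): it returns true iff the count at the run's
-- last digit equals `digits`, and otherwise resumes at j with count reset
theorem goA_run (cs : List Char) (d : Int) (j : Nat)
    (hj : j ≤ cs.length)
    (hstop : j = cs.length ∨ ((h : j < cs.length) → PySem.Chars.isdigit cs[j] = false)) :
    ∀ y, y ≤ j → (∀ t, y ≤ t → (ht : t < j) → PySem.Chars.isdigit (cs[t]'(by omega)) = true) →
      ∀ c : Int, goA cs d y c = if c + ((j : Int) - (y : Int)) = d ∧ y < j then true else goA cs d j 0 := by
  intro y hyj hrun c
  rcases Nat.eq_or_lt_of_le hyj with rfl | hlt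
  · rw [if_neg (by omega)]
    exact goA_reset cs d y hj hstop c
  · have hylen : y < cs.length := by omega
    have hdy : PySem.Chars.isdigit (cs[y]'hylen) = true := hrun y le_rfl hlt
    rw [goA, dif_pos hylen, if_pos hdy]
    by_cases hcd : c + 1 = d
    · rw [if_pos hcd]
      by_cases hyend : y + 1 = j
      · -- run ends right after y: A returns true
        subst hyend
        rw [if_pos (by exact ⟨by push_cast; omega, by omega⟩)]
        by_cases hlast : y = cs.length - 1
        · rw [dif_pos hlast]
        · rw [dif_neg hlast]
          have hy1 : y + 1 < cs.length := by omega
          have hnd : PySem.Chars.isdigit (cs[y+1]'hy1) = false := by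
            rcases hstop with he | h
            · omega
            · exact h hy1
          rw [if_pos (by simp [hnd])]
      · -- run continues: count passes `digits`, can never equal it again
        have hy1j : y + 1 < j := by omega
        have hdig1 : PySem.Chars.isdigit (cs[y+1]'(by omega)) = true :=
          hrun (y+1) (by omega) hy1j
        have hlast : ¬ (y = cs.length - 1) := by omega
        rw [dif_neg hlast, if_neg (by simp [hdig1])]
        rw [goA_run cs d j hj hstop (y+1) (by omega) (fun t ht1 ht2 => hrun t (by omega) ht2) (c+1)]
        rw [if_neg (by push_cast; intro h; omega), if_neg (by intro h; omega)]
    · rw [if_neg hcd]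
      rw [goA_run cs d j hj hstop (y+1) (by omega) (fun t ht1 ht2 => hrun t (by omega) ht2) (c+1)]
      by_cases hfin : c + ((j:Int) - (y:Int)) = d ∧ y < j
      · have hyj1 : y + 1 < j := by
          rcases Nat.eq_or_lt_of_le (Nat.succ_le_of_lt hlt) with he | h
          · exfalso; apply hcd; have : (j:Int) - (y:Int) = 1 := by omega
            omega
          · exact h
        rw [if_pos (by exact ⟨by push_cast; omega, hyj1⟩)]
        rw [if_pos hfin]
      · rw [if_neg (by push_cast; rintro ⟨h1, -⟩; exact hfin ⟨by omega, by omega⟩)]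
        rw [if_neg hfin]
termination_by y => j - y

-- main bridge: from any position with count 0, A and B agree
theorem goA_eq_goB (cs : List Char) (d : Int) :
    ∀ x, goA cs d x 0 = goB cs d x := by
  intro x
  by_cases hx : x < cs.length
  · by_cases hd : PySem.Chars.isdigit (cs[x]'hx) = true
    · -- digit: both consume the maximal run [x, runEnd cs x)
      have hjle : runEnd cs x ≤ cs.length := runEnd_le cs x (by omega)
      have hstop : runEnd cs x = cs.length ∨
          ((h : runEnd cs x < cs.length) → PySem.Chars.isdigit cs[runEnd cs x] = false) := by
        right; intro h; exact runEnd_not_digit cs x (runEnd cs x) rfl h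
      have hxj : x < runEnd cs x := by
        have h1 := runEnd_succ cs x hx hd
        have h2 := le_runEnd cs (x+1)
        omega
      rw [goA_run cs d (runEnd cs x) hjle hstop x (by omega)
            (fun t ht1 ht2 => runEnd_digits cs x t ht1 ht2 (by omega)) 0]
      rw [goB, dif_pos hx, dif_pos hd]
      by_cases heq : ((runEnd cs x : Int) - (x : Int)) = d
      · rw [if_pos (by exact ⟨by omega, hxj⟩), if_pos heq]
      · rw [if_neg (by intro h; exact heq (by omega)), if_neg heq]
        exact goA_eq_goB cs d (runEnd cs x)
    · -- non-digit: both step by one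
      rw [goA, goB, dif_pos hx, dif_pos hx, dif_neg hd, if_neg hd]
      exact goA_eq_goB cs d (x+1)
  · rw [goA, goB, dif_neg hx, dif_neg hx]
termination_by x => cs.length - x
decreasing_by
  · have h1 := runEnd_succ cs x hx hd
    have h2 := le_runEnd cs (x+1)
    omega
  · omega

-- ===== VERDICT (by name: the statement is the Claim_ definition above) =====
theorem string_contains_year_spec : Claim_equal_string_contains_year := by
  intro s d _
  unfold Spec_string_contains_year string_contains_year string_contains_year_alt
  exact goA_eq_goB s.toList d 0
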